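-- pv_equiv track=rewrite | github.com/jngaravitoc/BFE-c | PCA/SCF_analysis.py | nlm_coeff
-- ===== SOURCE A (Python) =====
-- def nlm_coeff(k, nmax, lmax):
--
--     """
--     Returns the coefficients n, l, m for a given number of
--     the.....
--     e.g k=1 is n=0, l=1, m=0
--
--     Input:
--     ------
--     k: Number of the coefficient. e.g
--     nmax: maximum n in the expansion.
--     lmax: maximum l in the expansion.
--
--     Output:
--     -------
--     (n, l, m)
--
--     """
--     i = 0
--     for n in range(nmax+1):
--         for l in range(lmax+1):
--             for m in range(l+1):
--                 if (i==k):
--                     return(n,l,m)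
--                     break
--                 i+=1
-- ===== SOURCE B (Python) =====
-- def nlm_coeff(k, nmax, lmax):
--     """Direct arithmetic: block per n has (lmax+1)(lmax+2)/2 triples;
--     divide k by the block size, then invert the triangular number for l."""
--     if nmax < 0 or lmax < 0:
--         return None
--     block = (lmax + 1) * (lmax + 2) // 2
--     if k < 0 or k >= (nmax + 1) * block:
--         return None
--     n, r = divmod(k, block)
--     l = 0
--     while r > l:
--         r -= l + 1
--         l += 1
--     return (n, l, r)
-- ===== Notes on version B (the rewrite author's own statement) =====
-- stated objective: faster
-- what changed: Replaces the triple nested counting loop with direct arithmetic: k is divided by the per-n block size (lmax+1)(lmax+2)/2 to get n, and l,m are recovered by inverting the triangular number with a short subtraction loop.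
import Mathlib
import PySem

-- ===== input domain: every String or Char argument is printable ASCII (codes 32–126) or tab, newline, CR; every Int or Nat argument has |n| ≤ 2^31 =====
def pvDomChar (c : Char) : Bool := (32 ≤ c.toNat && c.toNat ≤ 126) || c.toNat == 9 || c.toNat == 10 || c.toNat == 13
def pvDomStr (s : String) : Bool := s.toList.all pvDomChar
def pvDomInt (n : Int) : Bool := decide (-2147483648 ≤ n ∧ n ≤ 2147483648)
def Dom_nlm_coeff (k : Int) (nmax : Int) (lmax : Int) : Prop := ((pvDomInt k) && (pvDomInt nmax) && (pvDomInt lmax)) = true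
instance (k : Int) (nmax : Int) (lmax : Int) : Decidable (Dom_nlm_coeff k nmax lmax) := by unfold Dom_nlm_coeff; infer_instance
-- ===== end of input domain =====

-- B replaces A's triple nested counting loop by direct arithmetic (divide by the per-n
-- block size, then invert the triangular number for l); objective: faster.

-- ===== PORT A =====
-- innermost loop: for m in range(l+1): if i==k: return (n,l,m); i+=1
def nlmLoopM (k n l : Int) : List Int → Int → Option (List Int) × Int
  | [], i => (none, i)
  | m :: ms, i => if i = k then (some [n, l, m], i) else nlmLoopM k n l ms (i + 1)

-- middle loop: for l in range(lmax+1)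
def nlmLoopL (k n : Int) : List Int → Int → Option (List Int) × Int
  | [], i => (none, i)
  | l :: ls, i =>
      match nlmLoopM k n l (PySem.List.pyRange 0 (l + 1) 1) i with
      | (some v, i') => (some v, i')
      | (none, i') => nlmLoopL k n ls i'

-- outer loop: for n in range(nmax+1)
def nlmLoopN (k lmax : Int) : List Int → Int → Option (List Int) × Int
  | [], i => (none, i)
  | n :: ns, i =>
      match nlmLoopL k n (PySem.List.pyRange 0 (lmax + 1) 1) i with
      | (some v, i') => (some v, i')
      | (none, i') => nlmLoopN k lmax ns i'

def nlm_coeff (k : Int) (nmax : Int) (lmax : Int) : Option (List Int) :=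
  (nlmLoopN k lmax (PySem.List.pyRange 0 (nmax + 1) 1) 0).1

-- ===== PORT B =====
-- while r > l: r -= l + 1; l += 1   (l is the loop counter, starting at 0)
def nlmInvTri (l : Nat) (r : Int) : Int × Int :=
  if h : r > (l : Int) then nlmInvTri (l + 1) (r - ((l : Int) + 1)) else ((l : Int), r)
termination_by r.toNat
decreasing_by omega

def nlm_coeff_alt (k : Int) (nmax : Int) (lmax : Int) : Option (List Int) :=
  if nmax < 0 ∨ lmax < 0 then none
  else
    let block := PySem.Int.floordiv ((lmax + 1) * (lmax + 2)) 2
    if k < 0 ∨ (nmax + 1) * block ≤ k then none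
    else
      let n := PySem.Int.floordiv k block
      let r := PySem.Int.mod k block
      let p := nlmInvTri 0 r
      some [n, p.1, p.2]

-- ===== PRECONDITION & SPEC =====
def Spec_nlm_coeff (k : Int) (nmax : Int) (lmax : Int) (out : Option (List Int)) : Prop := out = nlm_coeff_alt k nmax lmax
instance (k : Int) (nmax : Int) (lmax : Int) (out : Option (List Int)) : Decidable (Spec_nlm_coeff k nmax lmax out) := by unfold Spec_nlm_coeff; infer_instance

-- ===== CLAIM (what is proved, stated in full; the proofs are below) =====
def Claim_equal_nlm_coeff : Prop := ∀ (k : Int) (nmax : Int) (lmax : Int), Dom_nlm_coeff k nmax lmax → Spec_nlm_coeff k nmax lmax (nlm_coeff k nmax lmax)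

-- ===== LEMMAS AND PROOFS =====

-- triangular numbers: nlmTri a = 0 + 1 + ... + a-1 + a? (nlmTri a = number of (l,m) pairs with l < a)
def nlmTri : Nat → Int
  | 0 => 0
  | a + 1 => nlmTri a + ((a : Int) + 1)

theorem nlmTri_two_mul (a : Nat) : 2 * nlmTri a = (a : Int) * ((a : Int) + 1) := by
  induction a with
  | zero => simp [nlmTri]
  | succ a ih => simp only [nlmTri]; push_cast; push_cast at ih; ring_nf; ring_nf at ih; omega

theorem nlmTri_le (a b : Nat) (h : a ≤ b) : nlmTri a ≤ nlmTri b := by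
  induction b with
  | zero =>
      have ha : a = 0 := by omega
      simp [ha]
  | succ b ih =>
      rcases Nat.lt_or_ge a (b + 1) with h' | h'
      · have h1 := ih (by omega)
        have h2 : (0 : Int) ≤ (b : Int) + 1 := by positivity
        simp only [nlmTri]; omega
      · have ha : a = b + 1 := by omega
        simp [ha]

theorem nlmTri_pos (a : Nat) (h : 1 ≤ a) : 1 ≤ nlmTri a := by
  have := nlmTri_le 1 a h
  simp [nlmTri] at this ⊢; omega

theorem nlmInvTri_stop (l : Nat) (r : Int) (h : ¬ r > (l : Int)) :
    nlmInvTri l r = ((l : Int), r) := by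
  rw [nlmInvTri]; simp [h]

theorem nlmInvTri_step (l : Nat) (r : Int) (h : r > (l : Int)) :
    nlmInvTri l r = nlmInvTri (l + 1) (r - ((l : Int) + 1)) := by
  rw [nlmInvTri]; simp [h]

theorem nlmLoopM_spec (k n l : Int) (c : Nat) : ∀ (a i : Int),
    nlmLoopM k n l (PySem.List.pyRange a (a + (c : Int)) 1) i =
      if i ≤ k ∧ k < i + (c : Int) then (some [n, l, a + (k - i)], k) else (none, i + (c : Int)) := by
  induction c with
  | zero =>
      intro a i
      rw [PySem.List.pyRange_one_eq_nil (by omega)]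
      rw [if_neg (by push_cast; omega)]
      simp [nlmLoopM]
  | succ c ih =>
      intro a i
      rw [PySem.List.pyRange_one_cons (by push_cast; omega)]
      simp only [nlmLoopM]
      by_cases hik : i = k
      · subst hik
        rw [if_pos rfl, if_pos (by push_cast; omega)]
        norm_num
      · rw [if_neg hik]
        rw [show a + ((c + 1 : Nat) : Int) = (a + 1) + (c : Int) by push_cast; ring]
        rw [ih (a + 1) (i + 1)]
        split_ifs with h1 h2 h2
        · rw [show a + 1 + (k - (i + 1)) = a + (k - i) by ring]
        · push_cast at h2; omega
        · push_cast at h2; omega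
        · rw [show i + 1 + (c : Int) = i + ((c + 1 : Nat) : Int) by push_cast; ring]

theorem nlmLoopL_spec (k n : Int) (c : Nat) : ∀ (a : Nat) (i : Int),
    nlmLoopL k n (PySem.List.pyRange (a : Int) ((a : Int) + (c : Int)) 1) i =
      if i ≤ k ∧ k < i + (nlmTri (a + c) - nlmTri a) then
        (some [n, (nlmInvTri a (k - i)).1, (nlmInvTri a (k - i)).2], k)
      else (none, i + (nlmTri (a + c) - nlmTri a)) := by
  induction c with
  | zero =>
      intro a i
      rw [PySem.List.pyRange_one_eq_nil (by omega)]
      rw [if_neg (by simp)]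
      simp [nlmLoopL]
  | succ c ih =>
      intro a i
      rw [PySem.List.pyRange_one_cons (by push_cast; omega)]
      simp only [nlmLoopL]
      have hM := nlmLoopM_spec k n (a : Int) (a + 1) 0 i
      push_cast at hM
      rw [show (0 : Int) + ((a : Int) + 1) = (a : Int) + 1 by ring] at hM
      rw [hM]
      have htriS : nlmTri (a + 1) = nlmTri a + ((a : Int) + 1) := rfl
      have htriS2 : nlmTri (a + (c + 1)) = nlmTri (a + 1 + c) := by congr 1; omega
      have hmono : nlmTri (a + 1) ≤ nlmTri (a + 1 + c) := nlmTri_le _ _ (by omega)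
      rw [htriS2]
      by_cases hfound : i ≤ k ∧ k < i + ((a : Int) + 1)
      · rw [if_pos hfound]
        dsimp only
        rw [if_pos (by omega)]
        rw [nlmInvTri_stop a (k - i) (by omega)]
        norm_num
      · rw [if_neg hfound]
        dsimp only
        have ih' := ih (a + 1) (i + ((a : Int) + 1))
        push_cast at ih'
        rw [show (a : Int) + ((c + 1 : Nat) : Int) = ((a : Int) + 1) + (c : Int) by push_cast; ring]
        rw [ih']
        split_ifs with h1 h2 h2
        · rw [nlmInvTri_step a (k - i) (by omega)]
          rw [show k - (i + ((a : Int) + 1)) = k - i - ((a : Int) + 1) by ring]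
        · omega
        · omega
        · congr 1; omega

theorem nlmLoopN_spec (k lmax : Int) (L : Nat) (hL : 1 ≤ L) (hlm : lmax + 1 = (L : Int))
    (c : Nat) : ∀ (a i : Int),
    nlmLoopN k lmax (PySem.List.pyRange a (a + (c : Int)) 1) i =
      if i ≤ k ∧ k < i + (c : Int) * nlmTri L then
        (some [a + (k - i) / nlmTri L,
               (nlmInvTri 0 ((k - i) % nlmTri L)).1,
               (nlmInvTri 0 ((k - i) % nlmTri L)).2], k)
      else (none, i + (c : Int) * nlmTri L) := by
  have hT : 1 ≤ nlmTri L := nlmTri_pos L hL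
  induction c with
  | zero =>
      intro a i
      rw [PySem.List.pyRange_one_eq_nil (by omega)]
      rw [if_neg (by push_cast; simp)]
      simp [nlmLoopN]
  | succ c ih =>
      intro a i
      have hnn : 0 ≤ (c : Int) * nlmTri L := by positivity
      have hexp : ((c + 1 : Nat) : Int) * nlmTri L = (c : Int) * nlmTri L + nlmTri L := by
        push_cast; ring
      rw [PySem.List.pyRange_one_cons (by push_cast; omega)]
      simp only [nlmLoopN]
      have hLl := nlmLoopL_spec k a L 0 i
      push_cast at hLl
      simp only [Nat.zero_add] at hLl
      rw [show nlmTri 0 = (0 : Int) from rfl, sub_zero] at hLl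
      rw [show (0 : Int) + (L : Int) = lmax + 1 by omega] at hLl
      rw [hLl]
      by_cases hfound : i ≤ k ∧ k < i + nlmTri L
      · rw [if_pos hfound]
        dsimp only
        rw [if_pos (by rw [hexp]; omega)]
        have h1 : (k - i) / nlmTri L = 0 := Int.ediv_eq_zero_of_lt (by omega) (by omega)
        have h2 : (k - i) % nlmTri L = k - i := Int.emod_eq_of_lt (by omega) (by omega)
        rw [h1, h2]
        norm_num
      · rw [if_neg hfound]
        dsimp only
        rw [show a + ((c + 1 : Nat) : Int) = (a + 1) + (c : Int) by push_cast; ring]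
        rw [ih (a + 1) (i + nlmTri L)]
        rw [hexp]
        split_ifs with h1 h2 h2
        · have hdiv : (k - (i + nlmTri L)) = (k - i) + nlmTri L * (-1) := by ring
          rw [hdiv, Int.add_mul_ediv_left _ _ (by omega : nlmTri L ≠ 0),
              Int.add_mul_emod_self_left]
          rw [show a + 1 + ((k - i) / nlmTri L + -1) = a + (k - i) / nlmTri L by ring]
        · omega
        · omega
        · congr 1; ring

theorem nlmLoopN_empty (k lmax : Int) (hlm : lmax + 1 ≤ 0) :
    ∀ (ns : List Int) (i : Int), nlmLoopN k lmax ns i = (none, i) := by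
  intro ns
  induction ns with
  | nil => intro i; rfl
  | cons n ns ih =>
      intro i
      simp only [nlmLoopN]
      rw [PySem.List.pyRange_one_eq_nil hlm]
      simp only [nlmLoopL]
      exact ih i

-- ===== VERDICT (by name: the statement is the Claim_ definition above) =====
theorem nlm_coeff_spec : Claim_equal_nlm_coeff := by
  intro k nmax lmax _
  unfold Spec_nlm_coeff nlm_coeff nlm_coeff_alt
  by_cases hn : nmax < 0
  · rw [PySem.List.pyRange_one_eq_nil (by omega)]
    simp [nlmLoopN, hn]
  · by_cases hl : lmax < 0
    · rw [nlmLoopN_empty k lmax (by omega)]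
      simp [hn, hl]
    · rw [if_neg (by omega)]
      set L : Nat := (lmax + 1).toNat with hLdef
      have hlm : lmax + 1 = (L : Int) := by omega
      have hL1 : 1 ≤ L := by omega
      set C : Nat := (nmax + 1).toNat with hCdef
      have hnm : nmax + 1 = (C : Int) := by omega
      have hT : 1 ≤ nlmTri L := nlmTri_pos L hL1
      have hblock : PySem.Int.floordiv ((lmax + 1) * (lmax + 2)) 2 = nlmTri L := by
        rw [PySem.Int.floordiv_eq_ediv_of_pos (by norm_num)]
        rw [show (lmax + 1) * (lmax + 2) = 2 * nlmTri L by
              rw [nlmTri_two_mul, ← hlm]; ring]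
        exact Int.mul_ediv_cancel_left _ (by norm_num)
      rw [hblock]
      have hA := nlmLoopN_spec k lmax L hL1 hlm C 0 0
      rw [show (0 : Int) + (C : Int) = (C : Int) by ring] at hA
      rw [hnm, hA]
      have hnn : 0 ≤ (C : Int) * nlmTri L := by positivity
      by_cases hin : 0 ≤ k ∧ k < (C : Int) * nlmTri L
      · rw [if_pos (by omega), if_neg (by omega)]
        dsimp only
        rw [PySem.Int.floordiv_eq_ediv_of_pos (by omega), PySem.Int.mod_eq_emod_of_pos (by omega)]
        norm_num
      · rw [if_neg (by omega), if_pos (by omega)]
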